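-- pv_equiv track=rewrite | github.com/taewookimmr/Programmers-Problems | greedy/joystick.py | solution
-- ===== SOURCE A (Python) =====
-- def getNext(updown_list, pindex):
--     n=len(updown_list)
--     none_zero_index = list(map(lambda x: min(abs(x-pindex), n-abs(x-pindex)) if updown_list[x] != 0 else n, range(n)))
--     minim = min(none_zero_index)
--     return none_zero_index.index(minim), minim
--
-- def solution(name):
--     n = len(name)
--     base = [0]*n
--     temp = list(map(lambda x : ord(name[x])-ord('A'), [e for e in range(n)]))
--     updown_list= list(map(lambda x : min(x, 26-x), temp))
--     s = sum(updown_list)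
--     updown_count = s
--     if s == 0:
--         return 0
--
--     count = 0
--     # 우선 0-index 알파벳을 처리한다.
--     if updown_list[0] != 0:
--         updown_list[0] = 0
--
--     s = sum(updown_list)
--     index = 0
--     while s != 0:
--         index, distance = getNext(updown_list, index)
--         updown_list[index] = 0
--         count +=distance
--         s = sum(updown_list)
--     return   updown_count + count
-- ===== SOURCE B (Python) =====
-- def solution(name):
--     n = len(name)
--     vals = [min(o, 26 - o) for o in (ord(c) - 65 for c in name)]
--     total = sum(vals)
--     if total == 0:
--         return 0
--     pos = [i for i in range(n) if vals[i] != 0]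
--     m = len(pos)
--     succ = {}
--     pred = {}
--     for j in range(m):
--         succ[pos[j]] = pos[(j + 1) % m]
--         pred[pos[j]] = pos[j - 1]
--     if vals[0] != 0:
--         cw, ccw = succ[0], pred[0]
--         succ[ccw] = cw
--         pred[cw] = ccw
--         s = total - vals[0]
--     else:
--         cw, ccw = pos[0], pos[-1]
--         s = total
--     p = 0
--     count = 0
--     while s != 0:
--         a = (cw - p) % n
--         b = (p - ccw) % n
--         q, d = (cw, a) if (a < b or (a == b and cw <= ccw)) else (ccw, b)
--         count += d
--         s -= vals[q]
--         nc, pc = succ[q], pred[q]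
--         succ[pc] = nc
--         pred[nc] = pc
--         p, cw, ccw = q, nc, pc
--     return total + count
-- ===== Notes on version B (the rewrite author's own statement) =====
-- stated objective: faster
-- what changed: A rebuilds a full-length circular-distance array, takes min and list.index and re-sums the whole array on every step; B builds a circular doubly-linked list (succ/pred dicts) of nonzero positions once, so each greedy step picks the nearer of the current node's two ring neighbours in O(1) and splices the visited node out.
import Mathlib
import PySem

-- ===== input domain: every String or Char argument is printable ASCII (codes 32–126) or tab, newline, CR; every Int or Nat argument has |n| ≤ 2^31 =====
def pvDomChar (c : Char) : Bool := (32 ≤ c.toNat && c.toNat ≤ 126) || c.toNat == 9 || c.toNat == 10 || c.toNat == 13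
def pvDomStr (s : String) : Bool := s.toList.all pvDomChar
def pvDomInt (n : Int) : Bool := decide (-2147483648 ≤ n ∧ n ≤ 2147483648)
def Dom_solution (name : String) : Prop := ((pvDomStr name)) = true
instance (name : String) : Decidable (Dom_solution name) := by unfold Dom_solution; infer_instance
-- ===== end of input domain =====

-- B is faster: instead of A's per-step full-length circular-distance array + min + list.index +
-- full re-sum, B builds a circular doubly-linked list (succ/pred dicts) of the nonzero positions
-- once and each greedy step picks the nearer of the current node's two ring neighbours in O(1),
-- splicing the visited node out.

-- ===== PORT A =====
-- getNext(updown_list, pindex)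
def pvGetNext (u : List Int) (p : Int) : Int × Int :=
  let n : Int := u.length
  let nzi : List Int := (PySem.List.pyRange 0 n 1).map (fun x =>
    if PySem.List.pyGetD u x 0 ≠ 0 then min |x - p| (n - |x - p|) else n)
  let minim : Int := (PySem.List.min? nzi (fun v => v)).getD 0
  ((((PySem.List.index? nzi minim).getD 0 : Nat) : Int), minim)

-- 'while s != 0:' loop of A; each iteration zeroes one entry, so u.length steps of fuel suffice
def pvALoop : Nat → List Int → Int → Int → Int
  | 0, _, _, count => count
  | fuel+1, u, index, count =>
    if u.sum ≠ 0 then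
      let r := pvGetNext u index
      pvALoop fuel (PySem.List.pySetD u r.1 0) r.1 (count + r.2)
    else count

def solution (name : String) : Int :=
  let cs := name.toList
  let n : Int := cs.length
  let temp := (PySem.List.pyRange 0 n 1).map (fun x => ((PySem.List.pyGetD cs x ' ').toNat : Int) - 65)
  let updown := temp.map (fun x => min x (26 - x))
  let updown_count := updown.sum
  if updown_count = 0 then 0
  else
    let u0 := if PySem.List.pyGetD updown 0 0 ≠ 0 then PySem.List.pySetD updown 0 0 else updown
    updown_count + pvALoop cs.length u0 0 0

-- ===== PORT B =====
-- 'while s != 0:' loop of B over the linked ring; succ[q]/pred[q] are Python dict lookups of a key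
-- that is always present (q is a ring node), ported as getD with default 0
def pvBLoop : Nat → Int → List Int → PySem.Dict Int Int → PySem.Dict Int Int → Int → Int → Int → Int → Int → Int
  | 0, _, _, _, _, _, _, _, _, count => count
  | fuel+1, n, vals, succ, pred, p, cw, ccw, s, count =>
    if s ≠ 0 then
      let a := PySem.Int.mod (cw - p) n
      let b := PySem.Int.mod (p - ccw) n
      let qd : Int × Int := if a < b ∨ (a = b ∧ cw ≤ ccw) then (cw, a) else (ccw, b)
      let nc := PySem.Dict.getD succ qd.1 0
      let pc := PySem.Dict.getD pred qd.1 0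
      pvBLoop fuel n vals (succ.insert pc nc) (pred.insert nc pc) qd.1 nc pc
        (s - PySem.List.pyGetD vals qd.1 0) (count + qd.2)
    else count

def solution_alt (name : String) : Int :=
  let cs := name.toList
  let n : Int := cs.length
  let vals := cs.map (fun c => min ((c.toNat : Int) - 65) (26 - ((c.toNat : Int) - 65)))
  let total := vals.sum
  if total = 0 then 0
  else
    let pos := (PySem.List.pyRange 0 n 1).filter (fun i => PySem.List.pyGetD vals i 0 ≠ 0)
    let m : Int := pos.length
    let sp := (PySem.List.pyRange 0 m 1).foldl
      (fun (sp : PySem.Dict Int Int × PySem.Dict Int Int) j =>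
        (sp.1.insert (PySem.List.pyGetD pos j 0) (PySem.List.pyGetD pos (PySem.Int.mod (j+1) m) 0),
         sp.2.insert (PySem.List.pyGetD pos j 0) (PySem.List.pyGetD pos (j-1) 0)))
      ((PySem.Dict.empty : PySem.Dict Int Int), (PySem.Dict.empty : PySem.Dict Int Int))
    if PySem.List.pyGetD vals 0 0 ≠ 0 then
      let cw := PySem.Dict.getD sp.1 0 0
      let ccw := PySem.Dict.getD sp.2 0 0
      total + pvBLoop cs.length n vals (sp.1.insert ccw cw) (sp.2.insert cw ccw) 0 cw ccw
        (total - PySem.List.pyGetD vals 0 0) 0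
    else
      total + pvBLoop cs.length n vals sp.1 sp.2 0
        (PySem.List.pyGetD pos 0 0) (PySem.List.pyGetD pos (-1) 0) total 0

-- ===== PRECONDITION & SPEC =====
def Spec_solution (name : String) (out : Int) : Prop := out = solution_alt name
instance (name : String) (out : Int) : Decidable (Spec_solution name out) := by unfold Spec_solution; infer_instance

-- ===== CLAIM (what is proved, stated in full; the proofs are below) =====
def Claim_equal_solution : Prop := ∀ (name : String), Dom_solution name → Spec_solution name (solution name)

-- ===== LEMMAS AND PROOFS =====

-- the nearest clockwise / counterclockwise remaining position seen from p
def pvNxt (n : Int) (rem : List Int) (p : Int) : Int :=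
  (PySem.List.min? rem (fun x => PySem.Int.mod (x - p) n)).getD 0
def pvPrv (n : Int) (rem : List Int) (p : Int) : Int :=
  (PySem.List.min? rem (fun x => PySem.Int.mod (p - x) n)).getD 0

-- the choice between two candidate neighbours: the closer one, tie to the smaller index
def pvStep (n cw ccw p : Int) : Int × Int :=
  if PySem.Int.mod (cw - p) n < PySem.Int.mod (p - ccw) n ∨
     (PySem.Int.mod (cw - p) n = PySem.Int.mod (p - ccw) n ∧ cw ≤ ccw) then
    (cw, PySem.Int.mod (cw - p) n)
  else (ccw, PySem.Int.mod (p - ccw) n)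

-- B's per-step selection seen abstractly: the closer of the two directional argmins
def pvSel (n : Int) (rem : List Int) (p : Int) : Int × Int :=
  pvStep n (pvNxt n rem p) (pvPrv n rem p) p

-- the coupling invariant between A's zeroed array u and the ghost list rem of remaining positions
def pvInv (vals u rem : List Int) (p s : Int) : Prop :=
  u.length = vals.length ∧
  (∀ k : Nat, k < vals.length → u.getD k 0 = if ((k : Int) ∈ rem) then vals.getD k 0 else 0) ∧
  rem.Nodup ∧
  (∀ x ∈ rem, 0 ≤ x ∧ x < (vals.length : Int) ∧ x ≠ p ∧ vals.getD x.toNat 0 ≠ 0) ∧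
  0 ≤ p ∧ p < (vals.length : Int) ∧
  s = u.sum

-- the ring invariant: succ/pred are the circular neighbour maps of rem (rem listed in ring order)
def pvRing (rem : List Int) (succ pred : PySem.Dict Int Int) : Prop :=
  ∀ j : Nat, j < rem.length →
    PySem.Dict.getD succ (rem.getD j 0) 0 = rem.getD ((j+1) % rem.length) 0 ∧
    PySem.Dict.getD pred (rem.getD j 0) 0 = rem.getD ((j+rem.length-1) % rem.length) 0

lemma pvALoop_succ (fuel : Nat) (u : List Int) (p count : Int) :
    pvALoop (fuel+1) u p count =
      if u.sum ≠ 0 then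
        pvALoop fuel (PySem.List.pySetD u (pvGetNext u p).1 0) (pvGetNext u p).1
          (count + (pvGetNext u p).2)
      else count := rfl

lemma pvModFacts (n p x : Int) (hn : 0 < n) (hx0 : 0 ≤ x) (hxn : x < n)
    (hp0 : 0 ≤ p) (hpn : p < n) :
    (PySem.Int.mod (x - p) n = x - p ∨ PySem.Int.mod (x - p) n = x - p + n) ∧
    0 ≤ PySem.Int.mod (x - p) n ∧ PySem.Int.mod (x - p) n < n := by
  refine ⟨?_, PySem.Int.mod_nonneg _ hn, PySem.Int.mod_lt _ hn⟩
  rw [PySem.Int.mod_eq_emod_of_pos hn]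
  by_cases h : p ≤ x
  · left; exact Int.emod_eq_of_lt (by omega) (by omega)
  · right
    have h1 : (x - p + n * 1) % n = (x - p) % n := Int.add_mul_emod_self_left (x - p) n 1
    rw [← h1, Int.emod_eq_of_lt (by omega) (by omega)]; omega

-- the circular key is injective on [0, n)
lemma pvKeyInj (n q x y : Int) (hn : 0 < n) (hx0 : 0 ≤ x) (hxn : x < n)
    (hy0 : 0 ≤ y) (hyn : y < n)
    (h : PySem.Int.mod (x - q) n = PySem.Int.mod (y - q) n) : x = y := by
  rw [PySem.Int.mod_eq_emod_of_pos hn, PySem.Int.mod_eq_emod_of_pos hn] at h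
  have hm : n ∣ (y - q) - (x - q) := Int.ModEq.dvd h
  have hxy : n ∣ y - x := by simpa using hm
  have h0 : y - x = 0 := Int.eq_zero_of_abs_lt_dvd hxy (abs_lt.mpr ⟨by omega, by omega⟩)
  omega

-- converse characterisation of min? under a uniquely-minimising key
lemma pvMinIntro {f : Int → Int} (l : List Int) (v : Int) (hv : v ∈ l)
    (hmin : ∀ y ∈ l, f v ≤ f y) (huniq : ∀ y ∈ l, f y = f v → y = v) :
    PySem.List.min? l f = some v := by
  rcases h : PySem.List.min? l f with - | m
  · rw [PySem.List.min?_eq_none_iff] at h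
    subst h; simp at hv
  have hm := PySem.List.min?_mem h
  have h1 := PySem.List.min?_isMin h v hv
  have h2 := hmin m hm
  have := huniq m hm (le_antisymm h1 h2)
  rw [this]

lemma pvSumSet (l : List Int) (k : Nat) (h : k < l.length) :
    (l.set k 0).sum = l.sum - l.getD k 0 := by
  induction l generalizing k with
  | nil => simp at h
  | cons x t ih =>
    cases k with
    | zero => simp [List.getD]
    | succ k =>
      simp only [List.set, List.sum_cons, List.getD_cons_succ]
      have := ih k (by simpa using h)
      omega

lemma pvIndexFirst (xs : List Int) (v : Int) (k : Nat) (hk : k < xs.length)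
    (h1 : xs.getD k 0 = v) (h2 : ∀ j, j < k → xs.getD j 0 ≠ v) :
    PySem.List.index? xs v = some k := by
  induction xs generalizing k with
  | nil => simp at hk
  | cons x t ih =>
    cases k with
    | zero =>
      simp only [List.getD_cons_zero] at h1
      subst h1; exact PySem.List.index?_cons_self x t
    | succ k =>
      have hx : x ≠ v := by
        have := h2 0 (Nat.succ_pos k); simpa using this
      rw [PySem.List.index?_cons_of_ne t hx]
      rw [ih k (by simpa using hk) (by simpa using h1)
        (fun j hj => by have := h2 (j+1) (by omega); simpa using this)]
      rfl

lemma pvSel_mem (n : Int) (rem : List Int) (p : Int) (hrem : rem ≠ []) :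
    (pvSel n rem p).1 ∈ rem := by
  unfold pvSel pvStep pvNxt pvPrv
  rcases h1 : PySem.List.min? rem (fun x => PySem.Int.mod (x - p) n) with - | nxt
  · rw [PySem.List.min?_eq_none_iff] at h1; exact absurd h1 hrem
  rcases h2 : PySem.List.min? rem (fun x => PySem.Int.mod (p - x) n) with - | prv
  · rw [PySem.List.min?_eq_none_iff] at h2; exact absurd h2 hrem
  simp only [Option.getD_some]
  split
  · exact PySem.List.min?_mem h1
  · exact PySem.List.min?_mem h2

-- the selection step: A's argmin over the padded circular-distance array equals B's
-- closer-of-the-two-directional-neighbours choice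
lemma pvGetNext_eq (vals u rem : List Int) (p s : Int)
    (hinv : pvInv vals u rem p s) (hrem : rem ≠ []) :
    pvGetNext u p = pvSel (vals.length : Int) rem p := by
  obtain ⟨hlen, hpt, hnd, hmemP, hp0, hpn, -⟩ := hinv
  have hn : 0 < (vals.length : Int) := by omega
  rcases h1 : PySem.List.min? rem (fun x => PySem.Int.mod (x - p) (vals.length : Int)) with - | nxt
  · rw [PySem.List.min?_eq_none_iff] at h1; exact absurd h1 hrem
  rcases h2 : PySem.List.min? rem (fun x => PySem.Int.mod (p - x) (vals.length : Int)) with - | prv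
  · rw [PySem.List.min?_eq_none_iff] at h2; exact absurd h2 hrem
  have hnxtm : nxt ∈ rem := PySem.List.min?_mem h1
  have hprvm : prv ∈ rem := PySem.List.min?_mem h2
  have hnxtmin := PySem.List.min?_isMin h1
  have hprvmin := PySem.List.min?_isMin h2
  simp only at hnxtmin hprvmin
  have F : ∀ x ∈ rem,
      (PySem.Int.mod (x - p) (vals.length : Int) = x - p ∨
       PySem.Int.mod (x - p) (vals.length : Int) = x - p + (vals.length : Int)) ∧
      0 ≤ PySem.Int.mod (x - p) (vals.length : Int) ∧
      PySem.Int.mod (x - p) (vals.length : Int) < (vals.length : Int) := by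
    intro x hx
    obtain ⟨hx0, hxn, -, -⟩ := hmemP x hx
    exact pvModFacts _ p x hn hx0 hxn hp0 hpn
  have G : ∀ x ∈ rem,
      (PySem.Int.mod (p - x) (vals.length : Int) = p - x ∨
       PySem.Int.mod (p - x) (vals.length : Int) = p - x + (vals.length : Int)) ∧
      0 ≤ PySem.Int.mod (p - x) (vals.length : Int) ∧
      PySem.Int.mod (p - x) (vals.length : Int) < (vals.length : Int) := by
    intro x hx
    obtain ⟨hx0, hxn, -, -⟩ := hmemP x hx
    exact pvModFacts _ x p hn hp0 hpn hx0 hxn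
  have hFn := F nxt hnxtm
  have hGn := G nxt hnxtm
  have hFp := F prv hprvm
  have hGp := G prv hprvm
  have hBn := hmemP nxt hnxtm
  have hBp := hmemP prv hprvm
  set a := PySem.Int.mod (nxt - p) (vals.length : Int) with hadef
  set b := PySem.Int.mod (p - prv) (vals.length : Int) with hbdef
  have ha_pos : 0 < a := by
    rcases hFn.1 with h | h <;> rcases hFn.2 with ⟨h3, h4⟩ <;>
      obtain ⟨-, -, hne, -⟩ := hBn <;> omega
  have hb_pos : 0 < b := by
    rcases hGp.1 with h | h <;> rcases hGp.2 with ⟨h3, h4⟩ <;>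
      obtain ⟨-, -, hne, -⟩ := hBp <;> omega
  have haN : a < (vals.length : Int) := hFn.2.2
  have hbN : b < (vals.length : Int) := hGp.2.2
  have hccw_nxt : PySem.Int.mod (p - nxt) (vals.length : Int) = (vals.length : Int) - a := by
    rcases hFn.1 with h | h <;> rcases hGn.1 with h' | h' <;>
      rcases hGn.2 with ⟨h3, h4⟩ <;> obtain ⟨-, -, hne, -⟩ := hBn <;> omega
  have hcw_prv : PySem.Int.mod (prv - p) (vals.length : Int) = (vals.length : Int) - b := by
    rcases hGp.1 with h | h <;> rcases hFp.1 with h' | h' <;>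
      rcases hFp.2 with ⟨h3, h4⟩ <;> obtain ⟨-, -, hne, -⟩ := hBp <;> omega
  have hba : b ≤ (vals.length : Int) - a := by
    have := hprvmin nxt hnxtm; rw [hccw_nxt] at this; exact this
  have hab : a ≤ (vals.length : Int) - b := by
    have := hnxtmin prv hprvm; rw [hcw_prv] at this; exact this
  have inj_cw : ∀ x ∈ rem, PySem.Int.mod (x - p) (vals.length : Int) = a → x = nxt := by
    intro x hx hxa
    have h5 := (F x hx).1
    obtain ⟨hx0, hxn, -, -⟩ := hmemP x hx
    obtain ⟨hn0, hnn, -, -⟩ := hBn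
    rcases h5 with h | h <;> rcases hFn.1 with h' | h' <;> omega
  have inj_ccw : ∀ x ∈ rem, PySem.Int.mod (p - x) (vals.length : Int) = b → x = prv := by
    intro x hx hxb
    have h5 := (G x hx).1
    obtain ⟨hx0, hxn, -, -⟩ := hmemP x hx
    obtain ⟨hp0', hpn', -, -⟩ := hBp
    rcases h5 with h | h <;> rcases hGp.1 with h' | h' <;> omega
  set f : Int → Int := fun x =>
    if PySem.List.pyGetD u x 0 ≠ 0 then
      min |x - p| ((vals.length : Int) - |x - p|) else (vals.length : Int) with hfdef
  have hfval : ∀ x ∈ rem,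
      f x = min (PySem.Int.mod (x - p) (vals.length : Int))
              (PySem.Int.mod (p - x) (vals.length : Int)) := by
    intro x hx
    obtain ⟨hx0, hxn, hxp, hvx⟩ := hmemP x hx
    have hu : PySem.List.pyGetD u x 0 = vals.getD x.toNat 0 := by
      rw [PySem.List.pyGetD_of_nonneg u 0 hx0]
      have hk := hpt x.toNat (by omega)
      rw [hk, if_pos (by rwa [Int.toNat_of_nonneg hx0])]
    have hFx := (F x hx).1
    have hFx2 := (F x hx).2
    have hGx := (G x hx).1
    have hGx2 := (G x hx).2
    simp only [hfdef]
    rw [if_pos (by rw [hu]; exact hvx)]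
    rcases abs_cases (x - p) with ⟨he, hsign⟩ | ⟨he, hsign⟩ <;> rw [he] <;>
      rcases hFx with h | h <;> rcases hGx with h' | h' <;> omega
  have hfzero : ∀ x : Int, 0 ≤ x → x < (vals.length : Int) → x ∉ rem →
      f x = (vals.length : Int) := by
    intro x hx0 hxn hxr
    have hu : PySem.List.pyGetD u x 0 = 0 := by
      rw [PySem.List.pyGetD_of_nonneg u 0 hx0]
      have hk := hpt x.toNat (by omega)
      rw [hk, if_neg (by rwa [Int.toNat_of_nonneg hx0])]
    simp only [hfdef]
    rw [if_neg (by simp [hu])]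
  set L : List Int := (PySem.List.pyRange 0 (vals.length : Int) 1).map f with hLdef
  have hLlen : L.length = vals.length := by
    simp only [hLdef, List.length_map, PySem.List.length_pyRange_one]
    omega
  have hLget : ∀ k : Nat, k < vals.length → L.getD k 0 = f (k : Int) := by
    intro k hk
    rw [List.getD_eq_getElem?_getD, hLdef,
      PySem.List.getElem?_map_pyRange_zero f vals.length k hk, Option.getD_some]
  have hlow : ∀ v ∈ L, min a b ≤ v := by
    intro v hv
    rw [hLdef] at hv
    obtain ⟨x, hxr, rfl⟩ := List.mem_map.mp hv
    rw [PySem.List.mem_pyRange_one] at hxr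
    by_cases hxrem : x ∈ rem
    · rw [hfval x hxrem]
      have c1 := hnxtmin x hxrem
      have c2 := hprvmin x hxrem
      omega
    · rw [hfzero x hxr.1 hxr.2 hxrem]; omega
  have final : ∀ q : Int, q ∈ rem → f q = min a b →
      (∀ j : Int, 0 ≤ j → j < (vals.length : Int) → j < q → f j ≠ min a b) →
      pvSel (vals.length : Int) rem p = (q, min a b) →
      pvGetNext u p = pvSel (vals.length : Int) rem p := by
    intro q hqm hfq hfirst hselq
    obtain ⟨hq0, hqN, -, -⟩ := hmemP q hqm
    rw [hselq]
    show (let n : Int := u.length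
      let nzi : List Int := (PySem.List.pyRange 0 n 1).map (fun x =>
        if PySem.List.pyGetD u x 0 ≠ 0 then min |x - p| (n - |x - p|) else n)
      let minim : Int := (PySem.List.min? nzi (fun v => v)).getD 0
      ((((PySem.List.index? nzi minim).getD 0 : Nat) : Int), minim)) = (q, min a b)
    simp only [hlen]
    rw [show ((PySem.List.pyRange 0 (vals.length : Int) 1).map (fun x =>
        if PySem.List.pyGetD u x 0 ≠ 0 then
          min |x - p| ((vals.length : Int) - |x - p|) else (vals.length : Int))) = L from rfl]
    rcases h3 : PySem.List.min? L (fun v => v) with - | m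
    · rw [PySem.List.min?_eq_none_iff] at h3
      rw [h3] at hLlen; simp at hLlen; omega
    have hm_mem : m ∈ L := PySem.List.min?_mem h3
    have hm_min := PySem.List.min?_isMin h3
    simp only at hm_min
    have hfqL : f q ∈ L := by
      rw [hLdef]
      exact List.mem_map_of_mem (PySem.List.mem_pyRange_one.mpr ⟨hq0, hqN⟩)
    have hm : m = min a b := le_antisymm (by have := hm_min (f q) hfqL; omega ) (hlow m hm_mem)
    subst hm
    simp only [Option.getD_some]
    have hidx : PySem.List.index? L (min a b) = some q.toNat := by
      apply pvIndexFirst L (min a b) q.toNat (by omega)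
      · rw [hLget q.toNat (by omega), Int.toNat_of_nonneg hq0, hfq]
      · intro j hj
        have hjlen : j < vals.length := by omega
        rw [hLget j hjlen]
        exact hfirst (j : Int) (by omega) (by omega) (by omega)
    rw [hidx]
    simp only [Option.getD_some]
    rw [Int.toNat_of_nonneg hq0]
  have hselred : pvSel (vals.length : Int) rem p =
      if a < b ∨ (a = b ∧ nxt ≤ prv) then (nxt, a) else (prv, b) := by
    unfold pvSel pvStep pvNxt pvPrv
    rw [h1, h2]
    simp only [Option.getD_some, ← hadef, ← hbdef]
  by_cases hc : a < b ∨ (a = b ∧ nxt ≤ prv)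
  · refine final nxt hnxtm ?_ ?_ ?_
    · rw [hfval nxt hnxtm, hccw_nxt]; omega
    · intro j hj0 hjN hjq
      by_cases hjr : j ∈ rem
      · rw [hfval j hjr]
        intro heq
        have c1 := hnxtmin j hjr
        have c2 := hprvmin j hjr
        have h4 : PySem.Int.mod (j - p) (vals.length : Int) = a ∨
            PySem.Int.mod (p - j) (vals.length : Int) = b := by omega
        rcases h4 with h4 | h4
        · have := inj_cw j hjr h4; omega
        · have hjprv := inj_ccw j hjr h4
          rcases hc with hc | ⟨hc1, hc2⟩
          · have h5 : PySem.Int.mod (j - p) (vals.length : Int) = a := by omega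
            have := inj_cw j hjr h5; omega
          · omega
      · rw [hfzero j hj0 hjN hjr]; omega
    · rw [hselred, if_pos hc]
      have : a = min a b := by omega
      rw [← this]
  · refine final prv hprvm ?_ ?_ ?_
    · rw [hfval prv hprvm, hcw_prv]; omega
    · intro j hj0 hjN hjq
      by_cases hjr : j ∈ rem
      · rw [hfval j hjr]
        intro heq
        have c1 := hnxtmin j hjr
        have c2 := hprvmin j hjr
        have h4 : PySem.Int.mod (j - p) (vals.length : Int) = a ∨
            PySem.Int.mod (p - j) (vals.length : Int) = b := by omega
        rcases h4 with h4 | h4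
        · have hjnxt := inj_cw j hjr h4
          have h5 : PySem.Int.mod (p - j) (vals.length : Int) = b := by omega
          have := inj_ccw j hjr h5; omega
        · have := inj_ccw j hjr h4; omega
      · rw [hfzero j hj0 hjN hjr]; omega
    · rw [hselred, if_neg hc]
      have : b = min a b := by omega
      rw [← this]

lemma pvInv_step (vals u rem : List Int) (p s q : Int)
    (hinv : pvInv vals u rem p s) (hqm : q ∈ rem) :
    pvInv vals (u.set q.toNat 0) (rem.erase q) q (s - PySem.List.pyGetD vals q 0) := by
  obtain ⟨hlen, hpt, hnd, hmem, hp0, hpn, hs⟩ := hinv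
  obtain ⟨hq0, hqN, hqp, hqv⟩ := hmem q hqm
  refine ⟨by simp [hlen], ?_, hnd.erase q, ?_, hq0, hqN, ?_⟩
  · intro k hk
    rw [List.getD_eq_getElem?_getD, List.getElem?_set]
    by_cases hkq : q.toNat = k
    · rw [if_pos hkq, if_pos (by omega), Option.getD_some]
      rw [if_neg ?_]
      rw [(hnd.mem_erase_iff)]
      push_neg
      intro hne
      exact absurd (by omega : (k : Int) = q) hne
    · rw [if_neg hkq, ← List.getD_eq_getElem?_getD, hpt k hk]
      have hne : (k : Int) ≠ q := by omega
      by_cases hkr : (k : Int) ∈ rem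
      · rw [if_pos hkr, if_pos ((hnd.mem_erase_iff).mpr ⟨hne, hkr⟩)]
      · rw [if_neg hkr, if_neg (fun h => hkr (List.mem_of_mem_erase h))]
  · intro x hx
    have hx' := List.mem_of_mem_erase hx
    obtain ⟨h5, h6, -, h8⟩ := hmem x hx'
    exact ⟨h5, h6, ((hnd.mem_erase_iff).mp hx).1, h8⟩
  · rw [pvSumSet u q.toNat (by omega)]
    have h9 := hpt q.toNat (by omega)
    rw [if_pos (by rwa [Int.toNat_of_nonneg hq0])] at h9
    rw [h9, PySem.List.pyGetD_of_nonneg vals 0 hq0]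
    omega

lemma pvInv_init (vals : List Int) (h0 : vals.sum ≠ 0) :
    pvInv vals (if PySem.List.pyGetD vals 0 0 ≠ 0 then PySem.List.pySetD vals 0 0 else vals)
      ((PySem.List.pyRange 1 (vals.length : Int) 1).filter
        (fun i => PySem.List.pyGetD vals i 0 ≠ 0))
      0 (vals.sum - PySem.List.pyGetD vals 0 0) := by
  have hne : vals ≠ [] := by rintro rfl; simp at h0
  have hNpos : 0 < vals.length := List.length_pos_iff.mpr hne
  have hget0 : PySem.List.pyGetD vals 0 0 = vals.getD 0 0 := by
    rw [PySem.List.pyGetD_of_nonneg vals 0 le_rfl]; rfl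
  have hmem0 : ∀ x : Int,
      x ∈ (PySem.List.pyRange 1 (vals.length : Int) 1).filter
        (fun i => PySem.List.pyGetD vals i 0 ≠ 0) ↔
      (1 ≤ x ∧ x < (vals.length : Int) ∧ PySem.List.pyGetD vals x 0 ≠ 0) := by
    intro x
    simp [List.mem_filter, PySem.List.mem_pyRange_one, and_assoc]
  refine ⟨?_, ?_, List.Nodup.filter _ (PySem.List.nodup_pyRange_one 1 _), ?_, le_rfl,
    by exact_mod_cast hNpos, ?_⟩
  · split
    · rw [PySem.List.pySetD_of_nonneg vals 0 le_rfl]; simp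
    · rfl
  · intro k hk
    cases k with
    | zero =>
      have hnot : ¬ (((0:Nat):Int) ∈ (PySem.List.pyRange 1 (vals.length : Int) 1).filter
          (fun i => PySem.List.pyGetD vals i 0 ≠ 0)) := by
        rw [hmem0]; rintro ⟨h1, -⟩; omega
      rw [if_neg hnot]
      split
      · rw [PySem.List.pySetD_of_nonneg vals 0 le_rfl]
        simp [List.getD_eq_getElem?_getD, List.getElem?_set, hNpos]
      · rename_i hc
        simp only [ne_eq, not_not] at hc
        rw [hget0] at hc
        simpa using hc
    | succ k =>
      have hLHS : (if PySem.List.pyGetD vals 0 0 ≠ 0 then PySem.List.pySetD vals 0 0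
          else vals).getD (k+1) 0 = vals.getD (k+1) 0 := by
        split
        · rw [PySem.List.pySetD_of_nonneg vals 0 le_rfl]
          rw [List.getD_eq_getElem?_getD, List.getElem?_set]
          rw [if_neg (by omega), ← List.getD_eq_getElem?_getD]
        · rfl
      rw [hLHS]
      have hpg : PySem.List.pyGetD vals ((k+1 : Nat) : Int) 0 = vals.getD (k+1) 0 := by
        rw [PySem.List.pyGetD_of_nonneg vals 0 (by omega)]
        simp
      by_cases hz : vals.getD (k+1) 0 = 0
      · rw [if_neg (by rw [hmem0]; rintro ⟨-, -, h3⟩; rw [hpg] at h3; exact h3 hz), hz]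
      · rw [if_pos (by rw [hmem0]; exact ⟨by omega, by exact_mod_cast hk, by rw [hpg]; exact hz⟩)]
  · intro x hx
    rw [hmem0] at hx
    obtain ⟨h1, h2, h3⟩ := hx
    refine ⟨by omega, h2, by omega, ?_⟩
    rw [PySem.List.pyGetD_of_nonneg vals 0 (by omega)] at h3
    exact h3
  · split
    · rename_i hc
      rw [PySem.List.pySetD_of_nonneg vals 0 le_rfl]
      rw [show ((0:Int).toNat) = 0 from rfl]
      rw [pvSumSet vals 0 hNpos, hget0]
    · rename_i hc
      push_neg at hc
      rw [hc]
      omega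

-- getD utilities on nodup / sorted lists
lemma pvGetDmem (rem : List Int) (j : Nat) (hj : j < rem.length) : rem.getD j 0 ∈ rem := by
  rw [List.getD_eq_getElem rem 0 hj]; exact List.getElem_mem hj

lemma pvGetDlt (rem : List Int) (hsort : rem.Pairwise (· < ·)) (i j : Nat)
    (hi : i < rem.length) (hj : j < rem.length) (hij : i < j) :
    rem.getD i 0 < rem.getD j 0 := by
  rw [List.getD_eq_getElem rem 0 hi, List.getD_eq_getElem rem 0 hj]
  exact List.pairwise_iff_getElem.mp hsort i j hi hj hij

lemma pvGetDle (rem : List Int) (hsort : rem.Pairwise (· < ·)) (i j : Nat)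
    (hi : i < rem.length) (hj : j < rem.length) (hij : i ≤ j) :
    rem.getD i 0 ≤ rem.getD j 0 := by
  rcases Nat.eq_or_lt_of_le hij with h | h
  · subst h; exact le_rfl
  · exact le_of_lt (pvGetDlt rem hsort i j hi hj h)

lemma pvGetDeq (rem : List Int) (hnd : rem.Nodup) (i j : Nat)
    (hi : i < rem.length) (hj : j < rem.length) :
    rem.getD i 0 = rem.getD j 0 ↔ i = j := by
  rw [List.getD_eq_getElem rem 0 hi, List.getD_eq_getElem rem 0 hj]
  constructor
  · intro h; exact (List.Nodup.getElem_inj_iff hnd).mp h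
  · intro h; subst h; rfl

-- small-argument value of the Python mod
lemma pvModSmall (a n : Int) (h0 : 0 ≤ a) (h : a < n) : PySem.Int.mod a n = a := by
  rw [PySem.Int.mod_eq_emod_of_pos (by omega)]
  exact Int.emod_eq_of_lt h0 h

lemma pvModSelf (n : Int) (h : 0 < n) : PySem.Int.mod n n = 0 := by
  rw [PySem.Int.mod_eq_emod_of_pos h]; simp

lemma pvKeyInj2 (n q x y : Int) (hn : 0 < n) (hx0 : 0 ≤ x) (hxn : x < n)
    (hy0 : 0 ≤ y) (hyn : y < n)
    (h : PySem.Int.mod (q - x) n = PySem.Int.mod (q - y) n) : x = y := by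
  rw [PySem.Int.mod_eq_emod_of_pos hn, PySem.Int.mod_eq_emod_of_pos hn] at h
  have hm : n ∣ (q - y) - (q - x) := Int.ModEq.dvd h
  have hxy : n ∣ x - y := by simpa using hm
  have h0 : x - y = 0 := Int.eq_zero_of_abs_lt_dvd hxy (abs_lt.mpr ⟨by omega, by omega⟩)
  omega

-- the circular key on [0, n), written without mod
lemma pvKeyRep (n q x : Int) (hq0 : 0 ≤ q) (hqn : q < n) (hx0 : 0 ≤ x) (hxn : x < n)
    (hne : x ≠ q) :
    PySem.Int.mod (x - q) n = if q < x then x - q else x - q + n := by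
  have h := pvModFacts n q x (by omega) hx0 hxn hq0 hqn
  rcases h.1 with h1 | h1 <;> rcases h.2 with ⟨h2, h3⟩ <;> split_ifs <;> omega

-- successor/predecessor index characterisations of Nat mod
lemma pvModSucc (a L : Nat) (h : a < L) :
    ((a+1) % L = 0 ∧ a = L-1) ∨ ((a+1) % L = a+1 ∧ a < L-1) := by
  by_cases hc : a = L - 1
  · left
    refine ⟨?_, hc⟩
    have : a + 1 = L := by omega
    rw [this, Nat.mod_self]
  · right
    exact ⟨Nat.mod_eq_of_lt (by omega), by omega⟩

lemma pvModPredN (a L : Nat) (h : a < L) :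
    ((a+L-1) % L = L-1 ∧ a = 0) ∨ ((a+L-1) % L = a-1 ∧ 1 ≤ a) := by
  by_cases hc : a = 0
  · left
    refine ⟨?_, hc⟩
    subst hc
    have h1 : 0 + L - 1 = L - 1 := by omega
    rw [h1]
    exact Nat.mod_eq_of_lt (by omega)
  · right
    refine ⟨?_, by omega⟩
    have h1 : a + L - 1 = (a-1) + L := by omega
    rw [h1, Nat.add_mod_right]
    exact Nat.mod_eq_of_lt (by omega)

-- erasing the element at index j0 of a nodup list, described by getD
lemma pvEraseGetD (rem : List Int) (j0 : Nat) (hnd : rem.Nodup) (hj0 : j0 < rem.length) :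
    (rem.erase (rem.getD j0 0)).length = rem.length - 1 ∧
    ∀ k : Nat, k < rem.length - 1 →
      (rem.erase (rem.getD j0 0)).getD k 0 = rem.getD (if k < j0 then k else k+1) 0 := by
  induction rem generalizing j0 with
  | nil => simp at hj0
  | cons x t ih =>
    cases j0 with
    | zero =>
      simp only [List.getD_cons_zero, List.erase_cons_head]
      refine ⟨by simp, ?_⟩
      intro k hk
      rw [if_neg (by omega)]
      rfl
    | succ j =>
      have hjt : j < t.length := by simpa using hj0
      have hq : (x :: t).getD (j+1) 0 = t.getD j 0 := rfl
      have hqm : t.getD j 0 ∈ t := pvGetDmem t j hjt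
      have hxq : x ≠ t.getD j 0 := by
        intro h
        exact (List.nodup_cons.mp hnd).1 (h ▸ hqm)
      rw [hq, List.erase_cons_tail (by simpa using hxq)]
      obtain ⟨ihl, ihg⟩ := ih j (List.nodup_cons.mp hnd).2 hjt
      refine ⟨by rw [List.length_cons, List.length_cons, ihl]; omega, ?_⟩
      intro k hk
      cases k with
      | zero =>
        rw [if_pos (by omega)]
        rfl
      | succ k =>
        have hkt : k < t.length - 1 := by simp only [List.length_cons] at hk; omega
        have h1 : (x :: t.erase (t.getD j 0)).getD (k+1) 0 = (t.erase (t.getD j 0)).getD k 0 := rfl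
        rw [h1, ihg k hkt]
        by_cases hkj : k < j
        · rw [if_pos hkj, if_pos (by omega)]
          rfl
        · rw [if_neg hkj, if_neg (by omega)]
          rfl

-- after removing q = rem[j0], its ring successor rem[(j0+1)%L] is the nearest clockwise position
lemma pvNxt_erase (n : Int) (rem : List Int) (j0 : Nat)
    (hsort : rem.Pairwise (· < ·)) (hb : ∀ x ∈ rem, 0 ≤ x ∧ x < n)
    (hj0 : j0 < rem.length) (hL : 2 ≤ rem.length) :
    pvNxt n (rem.erase (rem.getD j0 0)) (rem.getD j0 0) =
      rem.getD ((j0+1) % rem.length) 0 := by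
  have hnd : rem.Nodup := hsort.nodup
  have hj1lt : (j0+1) % rem.length < rem.length := Nat.mod_lt _ (by omega)
  have hj1ne : (j0+1) % rem.length ≠ j0 := by
    rcases pvModSucc j0 rem.length hj0 with ⟨h1, h2⟩ | ⟨h1, h2⟩ <;> omega
  have hqm : rem.getD j0 0 ∈ rem := pvGetDmem rem j0 hj0
  have hbq := hb _ hqm
  have hn : 0 < n := by omega
  have hncm0 : rem.getD ((j0+1) % rem.length) 0 ∈ rem := pvGetDmem rem _ hj1lt
  have hbnc := hb _ hncm0
  have hncq : rem.getD ((j0+1) % rem.length) 0 ≠ rem.getD j0 0 := by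
    intro h
    exact hj1ne ((pvGetDeq rem hnd _ _ hj1lt hj0).mp h)
  have hncm : rem.getD ((j0+1) % rem.length) 0 ∈ rem.erase (rem.getD j0 0) :=
    hnd.mem_erase_iff.mpr ⟨hncq, hncm0⟩
  have hmin : ∀ y ∈ rem.erase (rem.getD j0 0),
      PySem.Int.mod (rem.getD ((j0+1) % rem.length) 0 - rem.getD j0 0) n ≤
        PySem.Int.mod (y - rem.getD j0 0) n := by
    intro y hy
    obtain ⟨hyne, hym⟩ := hnd.mem_erase_iff.mp hy
    have hby := hb y hym
    obtain ⟨k, hk, hky⟩ := List.getElem_of_mem hym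
    have hyv : rem.getD k 0 = y := by rw [List.getD_eq_getElem rem 0 hk, hky]
    have hkj0 : k ≠ j0 := by
      intro h; subst h; rw [hyv] at hyne; exact hyne rfl
    rw [pvKeyRep n _ _ hbq.1 hbq.2 hby.1 hby.2 hyne,
        pvKeyRep n _ _ hbq.1 hbq.2 hbnc.1 hbnc.2 hncq]
    rcases pvModSucc j0 rem.length hj0 with ⟨h1, h2⟩ | ⟨h1, h2⟩
    · -- j0 is last, the successor is rem[0]; every other element is strictly left of q
      rw [h1]
      have hyq : y < rem.getD j0 0 := by
        rw [← hyv]; exact pvGetDlt rem hsort k j0 hk hj0 (by omega)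
      have hd : rem.getD ((j0+1) % rem.length) 0 = rem.getD 0 0 := by rw [h1]
      have hncq' : rem.getD 0 0 < rem.getD j0 0 :=
        pvGetDlt rem hsort 0 j0 (by omega) hj0 (by omega)
      have hncy : rem.getD 0 0 ≤ y := by
        rw [← hyv]; exact pvGetDle rem hsort 0 k (by omega) hk (by omega)
      split_ifs <;> omega
    · rw [h1]
      have hd : rem.getD ((j0+1) % rem.length) 0 = rem.getD (j0+1) 0 := by rw [h1]
      have hqnc : rem.getD j0 0 < rem.getD (j0+1) 0 :=
        pvGetDlt rem hsort j0 (j0+1) hj0 (by omega) (by omega)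
      by_cases hkj : k < j0
      · have hyq : y < rem.getD j0 0 := by
          rw [← hyv]; exact pvGetDlt rem hsort k j0 hk hj0 hkj
        split_ifs <;> omega
      · have hncy : rem.getD (j0+1) 0 ≤ y := by
          rw [← hyv]; exact pvGetDle rem hsort (j0+1) k (by omega) hk (by omega)
        split_ifs <;> omega
  have huniq : ∀ y ∈ rem.erase (rem.getD j0 0),
      PySem.Int.mod (y - rem.getD j0 0) n =
        PySem.Int.mod (rem.getD ((j0+1) % rem.length) 0 - rem.getD j0 0) n →
      y = rem.getD ((j0+1) % rem.length) 0 := by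
    intro y hy hkey
    obtain ⟨-, hym⟩ := hnd.mem_erase_iff.mp hy
    have hby := hb y hym
    exact pvKeyInj n (rem.getD j0 0) y _ hn hby.1 hby.2 hbnc.1 hbnc.2 hkey
  unfold pvNxt
  rw [pvMinIntro (rem.erase (rem.getD j0 0)) _ hncm hmin huniq]
  rfl

lemma pvPrv_erase (n : Int) (rem : List Int) (j0 : Nat)
    (hsort : rem.Pairwise (· < ·)) (hb : ∀ x ∈ rem, 0 ≤ x ∧ x < n)
    (hj0 : j0 < rem.length) (hL : 2 ≤ rem.length) :
    pvPrv n (rem.erase (rem.getD j0 0)) (rem.getD j0 0) =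
      rem.getD ((j0+rem.length-1) % rem.length) 0 := by
  have hnd : rem.Nodup := hsort.nodup
  have hj2lt : (j0+rem.length-1) % rem.length < rem.length := Nat.mod_lt _ (by omega)
  have hj2ne : (j0+rem.length-1) % rem.length ≠ j0 := by
    rcases pvModPredN j0 rem.length hj0 with ⟨h1, h2⟩ | ⟨h1, h2⟩ <;> omega
  have hqm : rem.getD j0 0 ∈ rem := pvGetDmem rem j0 hj0
  have hbq := hb _ hqm
  have hn : 0 < n := by omega
  have hpcm0 : rem.getD ((j0+rem.length-1) % rem.length) 0 ∈ rem := pvGetDmem rem _ hj2lt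
  have hbpc := hb _ hpcm0
  have hpcq : rem.getD ((j0+rem.length-1) % rem.length) 0 ≠ rem.getD j0 0 := by
    intro h
    exact hj2ne ((pvGetDeq rem hnd _ _ hj2lt hj0).mp h)
  have hpcm : rem.getD ((j0+rem.length-1) % rem.length) 0 ∈ rem.erase (rem.getD j0 0) :=
    hnd.mem_erase_iff.mpr ⟨hpcq, hpcm0⟩
  have hkeyP : ∀ x : Int, 0 ≤ x → x < n → x ≠ rem.getD j0 0 →
      PySem.Int.mod (rem.getD j0 0 - x) n =
        if x < rem.getD j0 0 then rem.getD j0 0 - x else rem.getD j0 0 - x + n := by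
    intro x hx0 hxn hne
    have h := pvModFacts n x (rem.getD j0 0) hn hbq.1 hbq.2 hx0 hxn
    rcases h.1 with h1 | h1 <;> rcases h.2 with ⟨h2, h3⟩ <;> split_ifs <;> omega
  have hmin : ∀ y ∈ rem.erase (rem.getD j0 0),
      PySem.Int.mod (rem.getD j0 0 - rem.getD ((j0+rem.length-1) % rem.length) 0) n ≤
        PySem.Int.mod (rem.getD j0 0 - y) n := by
    intro y hy
    obtain ⟨hyne, hym⟩ := hnd.mem_erase_iff.mp hy
    have hby := hb y hym
    obtain ⟨k, hk, hky⟩ := List.getElem_of_mem hym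
    have hyv : rem.getD k 0 = y := by rw [List.getD_eq_getElem rem 0 hk, hky]
    have hkj0 : k ≠ j0 := by
      intro h; subst h; rw [hyv] at hyne; exact hyne rfl
    rw [hkeyP y hby.1 hby.2 hyne, hkeyP _ hbpc.1 hbpc.2 hpcq]
    rcases pvModPredN j0 rem.length hj0 with ⟨h1, h2⟩ | ⟨h1, h2⟩
    · -- j0 = 0, the predecessor is the last element; every other element is right of q
      rw [h1]
      have hqy : rem.getD j0 0 < y := by
        rw [← hyv]; exact pvGetDlt rem hsort j0 k hj0 hk (by omega)
      have hd : rem.getD ((j0+rem.length-1) % rem.length) 0 = rem.getD (rem.length-1) 0 := by rw [h1]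
      have hqpc : rem.getD j0 0 < rem.getD (rem.length-1) 0 :=
        pvGetDlt rem hsort j0 (rem.length-1) hj0 (by omega) (by omega)
      have hypc : y ≤ rem.getD (rem.length-1) 0 := by
        rw [← hyv]; exact pvGetDle rem hsort k (rem.length-1) hk (by omega) (by omega)
      split_ifs <;> omega
    · rw [h1]
      have hd : rem.getD ((j0+rem.length-1) % rem.length) 0 = rem.getD (j0-1) 0 := by rw [h1]
      have hpcq' : rem.getD (j0-1) 0 < rem.getD j0 0 :=
        pvGetDlt rem hsort (j0-1) j0 (by omega) hj0 (by omega)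
      by_cases hkj : k < j0
      · have hypc : y ≤ rem.getD (j0-1) 0 := by
          rw [← hyv]; exact pvGetDle rem hsort k (j0-1) hk (by omega) (by omega)
        have hyq : y < rem.getD j0 0 := by
          rw [← hyv]; exact pvGetDlt rem hsort k j0 hk hj0 hkj
        split_ifs <;> omega
      · have hqy : rem.getD j0 0 < y := by
          rw [← hyv]; exact pvGetDlt rem hsort j0 k hj0 hk (by omega)
        split_ifs <;> omega
  have huniq : ∀ y ∈ rem.erase (rem.getD j0 0),
      PySem.Int.mod (rem.getD j0 0 - y) n =
        PySem.Int.mod (rem.getD j0 0 - rem.getD ((j0+rem.length-1) % rem.length) 0) n →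
      y = rem.getD ((j0+rem.length-1) % rem.length) 0 := by
    intro y hy hkey
    obtain ⟨-, hym⟩ := hnd.mem_erase_iff.mp hy
    have hby := hb y hym
    exact pvKeyInj2 n (rem.getD j0 0) y _ hn hby.1 hby.2 hbpc.1 hbpc.2 hkey
  unfold pvPrv
  rw [pvMinIntro (rem.erase (rem.getD j0 0)) _ hpcm hmin huniq]
  rfl
-- splicing the visited node out of the ring preserves the ring invariant
lemma pvRing_step (rem : List Int) (succ pred : PySem.Dict Int Int) (j0 : Nat)
    (hnd : rem.Nodup) (hj0 : j0 < rem.length) (hring : pvRing rem succ pred) :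
    pvRing (rem.erase (rem.getD j0 0))
      (succ.insert (PySem.Dict.getD pred (rem.getD j0 0) 0) (PySem.Dict.getD succ (rem.getD j0 0) 0))
      (pred.insert (PySem.Dict.getD succ (rem.getD j0 0) 0) (PySem.Dict.getD pred (rem.getD j0 0) 0)) := by
  obtain ⟨hlen', hget'⟩ := pvEraseGetD rem j0 hnd hj0
  obtain ⟨hnc, hpc⟩ := hring j0 hj0
  intro k hk
  rw [hlen'] at hk
  have hL2 : 2 ≤ rem.length := by omega
  have hk1lt : (k+1) % (rem.length-1) < rem.length - 1 := Nat.mod_lt _ (by omega)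
  have hk2lt : (k+(rem.length-1)-1) % (rem.length-1) < rem.length - 1 := Nat.mod_lt _ (by omega)
  rw [hnc, hpc, hlen', hget' k hk,
      hget' ((k+1) % (rem.length-1)) hk1lt, hget' ((k+(rem.length-1)-1) % (rem.length-1)) hk2lt]
  have hj1lt : (j0+1) % rem.length < rem.length := Nat.mod_lt _ (by omega)
  have hj2lt : (j0+rem.length-1) % rem.length < rem.length := Nat.mod_lt _ (by omega)
  have hj1 := pvModSucc j0 rem.length hj0
  have hj2 := pvModPredN j0 rem.length hj0
  have hk1 := pvModSucc k (rem.length-1) (by omega)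
  have hk2 := pvModPredN k (rem.length-1) (by omega)
  have hjkcases : (k < j0 ∧ (if k < j0 then k else k+1) = k) ∨
      (¬ k < j0 ∧ (if k < j0 then k else k+1) = k+1) := by
    by_cases h : k < j0
    · left; exact ⟨h, if_pos h⟩
    · right; exact ⟨h, if_neg h⟩
  have hjklt : (if k < j0 then k else k+1) < rem.length := by
    rcases hjkcases with ⟨h1, h2⟩ | ⟨h1, h2⟩ <;> omega
  have hjkj0 : (if k < j0 then k else k+1) ≠ j0 := by
    rcases hjkcases with ⟨h1, h2⟩ | ⟨h1, h2⟩ <;> omega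
  constructor
  · rw [PySem.Dict.getD_insert]
    by_cases hcase : (if k < j0 then k else k+1) = (j0+rem.length-1) % rem.length
    · rw [if_pos ((pvGetDeq rem hnd _ _ hjklt hj2lt).mpr hcase)]
      have hidx : (if (k+1) % (rem.length-1) < j0 then (k+1) % (rem.length-1)
          else (k+1) % (rem.length-1)+1) = (j0+1) % rem.length := by
        rcases hjkcases with ⟨h1, h2⟩ | ⟨h1, h2⟩ <;> rw [h2] at hcase <;>
          split_ifs <;> omega
      rw [hidx]
    · rw [if_neg (fun h => hcase ((pvGetDeq rem hnd _ _ hjklt hj2lt).mp h))]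
      rw [(hring _ hjklt).1]
      have hjk1 := pvModSucc (if k < j0 then k else k+1) rem.length hjklt
      have hidx : (if (k+1) % (rem.length-1) < j0 then (k+1) % (rem.length-1)
          else (k+1) % (rem.length-1)+1) = ((if k < j0 then k else k+1)+1) % rem.length := by
        rcases hjkcases with ⟨h1, h2⟩ | ⟨h1, h2⟩ <;> rw [h2] at hcase hjk1 ⊢ <;>
          split_ifs <;> omega
      rw [hidx]
  · rw [PySem.Dict.getD_insert]
    by_cases hcase : (if k < j0 then k else k+1) = (j0+1) % rem.length
    · rw [if_pos ((pvGetDeq rem hnd _ _ hjklt hj1lt).mpr hcase)]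
      have hidx : (if (k+(rem.length-1)-1) % (rem.length-1) < j0 then (k+(rem.length-1)-1) % (rem.length-1)
          else (k+(rem.length-1)-1) % (rem.length-1)+1) = (j0+rem.length-1) % rem.length := by
        rcases hjkcases with ⟨h1, h2⟩ | ⟨h1, h2⟩ <;> rw [h2] at hcase <;>
          split_ifs <;> omega
      rw [hidx]
    · rw [if_neg (fun h => hcase ((pvGetDeq rem hnd _ _ hjklt hj1lt).mp h))]
      rw [(hring _ hjklt).2]
      have hjk2 := pvModPredN (if k < j0 then k else k+1) rem.length hjklt
      have hidx : (if (k+(rem.length-1)-1) % (rem.length-1) < j0 then (k+(rem.length-1)-1) % (rem.length-1)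
          else (k+(rem.length-1)-1) % (rem.length-1)+1) = ((if k < j0 then k else k+1)+rem.length-1) % rem.length := by
        rcases hjkcases with ⟨h1, h2⟩ | ⟨h1, h2⟩ <;> rw [h2] at hcase hjk2 ⊢ <;>
          split_ifs <;> omega
      rw [hidx]
lemma pvBLoop_succ (fuel : Nat) (n : Int) (vals : List Int) (succ pred : PySem.Dict Int Int)
    (p cw ccw s count : Int) :
    pvBLoop (fuel+1) n vals succ pred p cw ccw s count =
      if s ≠ 0 then
        pvBLoop fuel n vals
          (succ.insert (PySem.Dict.getD pred (pvStep n cw ccw p).1 0) (PySem.Dict.getD succ (pvStep n cw ccw p).1 0))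
          (pred.insert (PySem.Dict.getD succ (pvStep n cw ccw p).1 0) (PySem.Dict.getD pred (pvStep n cw ccw p).1 0))
          (pvStep n cw ccw p).1
          (PySem.Dict.getD succ (pvStep n cw ccw p).1 0)
          (PySem.Dict.getD pred (pvStep n cw ccw p).1 0)
          (s - PySem.List.pyGetD vals (pvStep n cw ccw p).1 0)
          (count + (pvStep n cw ccw p).2)
      else count := rfl

-- the main loop coupling: A's loop on the zeroed array = B's loop on the linked ring
lemma pvLoop_eq (fuel : Nat) (vals u rem : List Int) (succ pred : PySem.Dict Int Int)
    (p cw ccw s count : Int)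
    (hinv : pvInv vals u rem p s)
    (hsort : rem.Pairwise (· < ·))
    (hring : pvRing rem succ pred)
    (hcw : rem ≠ [] → cw = pvNxt (vals.length : Int) rem p ∧ ccw = pvPrv (vals.length : Int) rem p) :
    pvALoop fuel u p count = pvBLoop fuel (vals.length : Int) vals succ pred p cw ccw s count := by
  induction fuel generalizing u rem succ pred p cw ccw s count with
  | zero => rfl
  | succ fuel ih =>
    have hs : s = u.sum := hinv.2.2.2.2.2.2
    rw [pvALoop_succ, pvBLoop_succ, ← hs]
    by_cases h0 : s = 0
    · simp [h0]
    · rw [if_pos h0, if_pos h0]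
      have hrem : rem ≠ [] := by
        rintro rfl
        apply h0
        rw [hs]
        apply List.sum_eq_zero
        intro x hx
        obtain ⟨k, hk, he⟩ := List.getElem_of_mem hx
        have h5 := hinv.2.1 k (by rw [← hinv.1]; exact hk)
        simp only [List.not_mem_nil, if_neg] at h5
        rw [List.getD_eq_getElem u 0 hk, he] at h5
        simp at h5
        exact h5
      obtain ⟨hcw1, hcw2⟩ := hcw hrem
      rw [hcw1, hcw2]
      rw [show pvStep (vals.length : Int) (pvNxt (vals.length : Int) rem p)
            (pvPrv (vals.length : Int) rem p) p = pvSel (vals.length : Int) rem p from rfl]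
      rw [pvGetNext_eq vals u rem p s hinv hrem]
      have hqm : (pvSel (vals.length : Int) rem p).1 ∈ rem := pvSel_mem _ _ _ hrem
      obtain ⟨hq0, hqN, -, -⟩ := hinv.2.2.2.1 _ hqm
      rw [PySem.List.pySetD_of_nonneg u 0 hq0]
      obtain ⟨j0, hj0, hjq⟩ := List.getElem_of_mem hqm
      have hjqD : rem.getD j0 0 = (pvSel (vals.length : Int) rem p).1 := by
        rw [List.getD_eq_getElem rem 0 hj0, hjq]
      have hnd : rem.Nodup := hsort.nodup
      have hinv' := pvInv_step vals u rem p s _ hinv hqm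
      have hsort' : (rem.erase (pvSel (vals.length : Int) rem p).1).Pairwise (· < ·) :=
        List.Pairwise.sublist (List.erase_sublist) hsort
      have hring' := pvRing_step rem succ pred j0 hnd hj0 hring
      rw [hjqD] at hring'
      have hb : ∀ x ∈ rem, 0 ≤ x ∧ x < (vals.length : Int) := fun x hx =>
        ⟨(hinv.2.2.2.1 x hx).1, (hinv.2.2.2.1 x hx).2.1⟩
      have hcw' : rem.erase (pvSel (vals.length : Int) rem p).1 ≠ [] →
          PySem.Dict.getD succ (pvSel (vals.length : Int) rem p).1 0 =
            pvNxt (vals.length : Int) (rem.erase (pvSel (vals.length : Int) rem p).1)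
              (pvSel (vals.length : Int) rem p).1 ∧
          PySem.Dict.getD pred (pvSel (vals.length : Int) rem p).1 0 =
            pvPrv (vals.length : Int) (rem.erase (pvSel (vals.length : Int) rem p).1)
              (pvSel (vals.length : Int) rem p).1 := by
        intro hne
        have hlenE := (pvEraseGetD rem j0 hnd hj0).1
        rw [hjqD] at hlenE
        have hposE : 0 < (rem.erase (pvSel (vals.length : Int) rem p).1).length :=
          List.length_pos_iff.mpr hne
        have hlen2 : 2 ≤ rem.length := by omega
        constructor
        · have h1 := pvNxt_erase (vals.length : Int) rem j0 hsort hb hj0 hlen2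
          rw [hjqD] at h1
          rw [h1]
          have h2 := (hring j0 hj0).1
          rw [hjqD] at h2
          exact h2
        · have h1 := pvPrv_erase (vals.length : Int) rem j0 hsort hb hj0 hlen2
          rw [hjqD] at h1
          rw [h1]
          have h2 := (hring j0 hj0).2
          rw [hjqD] at h2
          exact h2
      exact ih _ _ _ _ _ _ _ _ _ hinv' hsort' hring' hcw'
-- the ring-building fold: after processing indices 0..k-1 every processed key holds its value
lemma pvBuildAux (pos : List Int) (hnd : pos.Nodup) (m : Int) (k : Nat) (hk : k ≤ pos.length) :
    ∀ j : Nat, j < k →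
      ((PySem.List.pyRange 0 (k : Int) 1).foldl
        (fun (sp : PySem.Dict Int Int × PySem.Dict Int Int) i =>
          (sp.1.insert (PySem.List.pyGetD pos i 0) (PySem.List.pyGetD pos (PySem.Int.mod (i+1) m) 0),
           sp.2.insert (PySem.List.pyGetD pos i 0) (PySem.List.pyGetD pos (i-1) 0)))
        ((PySem.Dict.empty : PySem.Dict Int Int), (PySem.Dict.empty : PySem.Dict Int Int))).1.getD
          (pos.getD j 0) 0 = PySem.List.pyGetD pos (PySem.Int.mod ((j : Int)+1) m) 0 ∧
      ((PySem.List.pyRange 0 (k : Int) 1).foldl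
        (fun (sp : PySem.Dict Int Int × PySem.Dict Int Int) i =>
          (sp.1.insert (PySem.List.pyGetD pos i 0) (PySem.List.pyGetD pos (PySem.Int.mod (i+1) m) 0),
           sp.2.insert (PySem.List.pyGetD pos i 0) (PySem.List.pyGetD pos (i-1) 0)))
        ((PySem.Dict.empty : PySem.Dict Int Int), (PySem.Dict.empty : PySem.Dict Int Int))).2.getD
          (pos.getD j 0) 0 = PySem.List.pyGetD pos ((j : Int)-1) 0 := by
  induction k with
  | zero => intro j hj; omega
  | succ k ih =>
    intro j hj
    have hcast : ((k+1 : Nat) : Int) = (k : Int) + 1 := by push_cast; ring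
    rw [hcast, PySem.List.pyRange_one_succ_right (by omega), List.foldl_append]
    simp only [List.foldl_cons, List.foldl_nil]
    have hkk : PySem.List.pyGetD pos ((k : Nat) : Int) 0 = pos.getD k 0 := by
      simp [PySem.List.pyGetD_natCast]
    rcases Nat.lt_or_ge j k with hjk | hjk
    · have hne : pos.getD j 0 ≠ pos.getD k 0 := by
        intro h
        have := (pvGetDeq pos hnd j k (by omega) (by omega)).mp h
        omega
      constructor
      · rw [PySem.Dict.getD_insert, hkk, if_neg hne]
        exact (ih (by omega) j hjk).1
      · rw [PySem.Dict.getD_insert, hkk, if_neg hne]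
        exact (ih (by omega) j hjk).2
    · have hjlk : j = k := by omega
      subst hjlk
      constructor
      · rw [hkk, PySem.Dict.getD_insert_self]
      · rw [hkk, PySem.Dict.getD_insert_self]

-- the fold in B builds exactly the circular neighbour maps of pos
lemma pvBuildRing (pos : List Int) (hnd : pos.Nodup) :
    pvRing pos
      ((PySem.List.pyRange 0 (pos.length : Int) 1).foldl
        (fun (sp : PySem.Dict Int Int × PySem.Dict Int Int) i =>
          (sp.1.insert (PySem.List.pyGetD pos i 0)
            (PySem.List.pyGetD pos (PySem.Int.mod (i+1) (pos.length : Int)) 0),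
           sp.2.insert (PySem.List.pyGetD pos i 0) (PySem.List.pyGetD pos (i-1) 0)))
        ((PySem.Dict.empty : PySem.Dict Int Int), (PySem.Dict.empty : PySem.Dict Int Int))).1
      ((PySem.List.pyRange 0 (pos.length : Int) 1).foldl
        (fun (sp : PySem.Dict Int Int × PySem.Dict Int Int) i =>
          (sp.1.insert (PySem.List.pyGetD pos i 0)
            (PySem.List.pyGetD pos (PySem.Int.mod (i+1) (pos.length : Int)) 0),
           sp.2.insert (PySem.List.pyGetD pos i 0) (PySem.List.pyGetD pos (i-1) 0)))
        ((PySem.Dict.empty : PySem.Dict Int Int), (PySem.Dict.empty : PySem.Dict Int Int))).2 := by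
  intro j hj
  obtain ⟨h1, h2⟩ := pvBuildAux pos hnd (pos.length : Int) pos.length le_rfl j hj
  constructor
  · rw [h1]
    rcases pvModSucc j pos.length hj with ⟨hm, hj'⟩ | ⟨hm, hj'⟩
    · have hc : ((j : Int) + 1) = (pos.length : Int) := by omega
      rw [hc, pvModSelf _ (by omega), hm, PySem.List.pyGetD_zero]
    · have hc : ((j : Int) + 1) = ((j+1 : Nat) : Int) := by push_cast; ring
      rw [hc, pvModSmall _ _ (by omega) (by omega), hm,
        PySem.List.pyGetD_of_nonneg pos 0 (by omega)]
      congr 1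
  · rw [h2]
    rcases pvModPredN j pos.length hj with ⟨hm, hj'⟩ | ⟨hm, hj'⟩
    · subst hj'
      have hne : pos ≠ [] := by
        intro h; rw [h] at hj; simp at hj
      have hc : ((0 : Nat) : Int) - 1 = (-1 : Int) := by omega
      rw [hc, PySem.List.pyGetD_neg_one pos 0 hne, hm, List.getLast_eq_getElem hne,
        List.getD_eq_getElem pos 0 (by omega)]
    · have hc : ((j : Int) - 1) = ((j-1 : Nat) : Int) := by omega
      rw [hc, hm]
      simp [PySem.List.pyGetD_natCast]

-- from position 0, the nearest clockwise element of a sorted list of positions in [1, n)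
-- is its head and the nearest counterclockwise one is its last element
lemma pvNxt_init (n : Int) (pos : List Int) (hsort : pos.Pairwise (· < ·))
    (hb : ∀ x ∈ pos, 1 ≤ x ∧ x < n) (hne : pos ≠ []) :
    pvNxt n pos 0 = pos.getD 0 0 ∧ pvPrv n pos 0 = pos.getD (pos.length-1) 0 := by
  have hlen : 0 < pos.length := List.length_pos_iff.mpr hne
  have hb0 := hb _ (pvGetDmem pos 0 hlen)
  have hbl := hb _ (pvGetDmem pos (pos.length-1) (by omega))
  have hn : 0 < n := by omega
  have hkey : ∀ x ∈ pos, PySem.Int.mod (x - 0) n = x := by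
    intro x hx
    have hbx := hb x hx
    rw [show x - 0 = x from by ring, pvModSmall x n (by omega) (by omega)]
  have hkey2 : ∀ x ∈ pos, PySem.Int.mod (0 - x) n = n - x := by
    intro x hx
    have hbx := hb x hx
    have h := pvModFacts n x 0 hn le_rfl hn (by omega) hbx.2
    rcases h.1 with h1 | h1 <;> rcases h.2 with ⟨h2, h3⟩ <;> omega
  constructor
  · unfold pvNxt
    rw [pvMinIntro pos (pos.getD 0 0) (pvGetDmem pos 0 hlen) ?_ ?_]
    · rfl
    · intro y hy
      rw [hkey y hy, hkey _ (pvGetDmem pos 0 hlen)]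
      obtain ⟨k, hk, hky⟩ := List.getElem_of_mem hy
      rw [← List.getD_eq_getElem pos 0 hk] at hky
      rw [← hky]
      exact pvGetDle pos hsort 0 k (by omega) hk (by omega)
    · intro y hy hk
      rw [hkey y hy, hkey _ (pvGetDmem pos 0 hlen)] at hk
      exact hk
  · unfold pvPrv
    rw [pvMinIntro pos (pos.getD (pos.length-1) 0) (pvGetDmem pos _ (by omega)) ?_ ?_]
    · rfl
    · intro y hy
      rw [hkey2 y hy, hkey2 _ (pvGetDmem pos _ (by omega))]
      obtain ⟨k, hk, hky⟩ := List.getElem_of_mem hy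
      rw [← List.getD_eq_getElem pos 0 hk] at hky
      rw [← hky]
      have := pvGetDle pos hsort k (pos.length-1) hk (by omega) (by omega)
      omega
    · intro y hy hk
      rw [hkey2 y hy, hkey2 _ (pvGetDmem pos _ (by omega))] at hk
      have hby := hb y hy
      omega
-- ===== VERDICT (by name: the statement is the Claim_ definition above) =====
theorem solution_spec : Claim_equal_solution := by
  unfold Claim_equal_solution
  intro name _
  unfold Spec_solution
  show solution name = solution_alt name
  simp only [solution, solution_alt]
  rw [show (fun x => ((PySem.List.pyGetD name.toList x ' ').toNat : Int) - 65) =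
      (fun c : Char => ((c.toNat : Int) - 65)) ∘ (fun j => PySem.List.pyGetD name.toList j ' ')
      from rfl]
  rw [← List.map_map, PySem.List.map_pyGetD_pyRange_zero' name.toList ' ']
  rw [List.map_map]
  rw [show ((fun x => min x (26 - x)) ∘ (fun c : Char => ((c.toNat : Int) - 65))) =
      (fun c : Char => min ((c.toNat : Int) - 65) (26 - ((c.toNat : Int) - 65))) from rfl]
  by_cases h0 : (name.toList.map
      (fun c : Char => min ((c.toNat : Int) - 65) (26 - ((c.toNat : Int) - 65)))).sum = 0
  · rw [if_pos h0, if_pos h0]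
  · rw [if_neg h0, if_neg h0]
    have hlen2 : (name.toList.map
        (fun c : Char => min ((c.toNat : Int) - 65) (26 - ((c.toNat : Int) - 65)))).length =
        name.toList.length := by simp
    rw [show ((name.toList.length : Int)) = ((name.toList.map
        (fun c : Char => min ((c.toNat : Int) - 65) (26 - ((c.toNat : Int) - 65)))).length : Int)
      from by rw [hlen2]]
    set vals := name.toList.map
      (fun c : Char => min ((c.toNat : Int) - 65) (26 - ((c.toNat : Int) - 65))) with hvals
    have hvne : vals ≠ [] := by rintro h; rw [h] at h0; simp at h0
    have hNpos : 0 < vals.length := List.length_pos_iff.mpr hvne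
    -- the ghost list of remaining positions and the built ring
    have hsortrem : ((PySem.List.pyRange 1 (vals.length : Int) 1).filter
        (fun i => PySem.List.pyGetD vals i 0 ≠ 0)).Pairwise (· < ·) :=
      List.Pairwise.filter _ (PySem.List.pairwise_lt_pyRange_one 1 _)
    have hsortpos : ((PySem.List.pyRange 0 (vals.length : Int) 1).filter
        (fun i => PySem.List.pyGetD vals i 0 ≠ 0)).Pairwise (· < ·) :=
      List.Pairwise.filter _ (PySem.List.pairwise_lt_pyRange_one 0 _)
    have hndpos := hsortpos.nodup
    have hbpos : ∀ x ∈ (PySem.List.pyRange 0 (vals.length : Int) 1).filter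
        (fun i => PySem.List.pyGetD vals i 0 ≠ 0), 0 ≤ x ∧ x < (vals.length : Int) := by
      intro x hx
      have := (List.mem_filter.mp hx).1
      rw [PySem.List.mem_pyRange_one] at this
      exact this
    have hbrem : ∀ x ∈ (PySem.List.pyRange 1 (vals.length : Int) 1).filter
        (fun i => PySem.List.pyGetD vals i 0 ≠ 0), 1 ≤ x ∧ x < (vals.length : Int) := by
      intro x hx
      have := (List.mem_filter.mp hx).1
      rw [PySem.List.mem_pyRange_one] at this
      exact this
    have hsplit : PySem.List.pyRange 0 (vals.length : Int) 1 =
        0 :: PySem.List.pyRange 1 (vals.length : Int) 1 :=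
      PySem.List.pyRange_one_cons (by exact_mod_cast hNpos)
    have hinv := pvInv_init vals h0
    have hring0 := pvBuildRing ((PySem.List.pyRange 0 (vals.length : Int) 1).filter
        (fun i => PySem.List.pyGetD vals i 0 ≠ 0)) hndpos
    by_cases hv0 : PySem.List.pyGetD vals 0 0 ≠ 0
    · rw [if_pos hv0] at hinv
      rw [if_pos hv0, if_pos hv0]
      congr 1
      have hposeq : (PySem.List.pyRange 0 (vals.length : Int) 1).filter
          (fun i => PySem.List.pyGetD vals i 0 ≠ 0) =
          0 :: (PySem.List.pyRange 1 (vals.length : Int) 1).filter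
            (fun i => PySem.List.pyGetD vals i 0 ≠ 0) := by
        rw [hsplit, List.filter_cons, if_pos (by simpa using hv0)]
      have hposlen : 0 < ((PySem.List.pyRange 0 (vals.length : Int) 1).filter
          (fun i => PySem.List.pyGetD vals i 0 ≠ 0)).length := by
        rw [hposeq]; simp
      have hposget0 : ((PySem.List.pyRange 0 (vals.length : Int) 1).filter
          (fun i => PySem.List.pyGetD vals i 0 ≠ 0)).getD 0 0 = 0 := by
        rw [hposeq]; rfl
      have herase : ((PySem.List.pyRange 0 (vals.length : Int) 1).filter
          (fun i => PySem.List.pyGetD vals i 0 ≠ 0)).erase 0 =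
          (PySem.List.pyRange 1 (vals.length : Int) 1).filter
            (fun i => PySem.List.pyGetD vals i 0 ≠ 0) := by
        rw [hposeq]; exact List.erase_cons_head _ _
      have hstep := pvRing_step _ _ _ 0 hndpos hposlen hring0
      rw [hposget0, herase] at hstep
      refine pvLoop_eq name.toList.length vals _ _ _ _ 0 _ _ _ 0 hinv hsortrem hstep ?_
      intro hne
      have h2 : 2 ≤ ((PySem.List.pyRange 0 (vals.length : Int) 1).filter
          (fun i => PySem.List.pyGetD vals i 0 ≠ 0)).length := by
        rw [hposeq, List.length_cons]
        have := List.length_pos_iff.mpr hne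
        omega
      have hnxt := pvNxt_erase (vals.length : Int) _ 0 hsortpos hbpos hposlen h2
      have hprv := pvPrv_erase (vals.length : Int) _ 0 hsortpos hbpos hposlen h2
      rw [hposget0, herase] at hnxt hprv
      have hr0 := hring0 0 hposlen
      rw [hposget0] at hr0
      exact ⟨hr0.1.trans hnxt.symm, hr0.2.trans hprv.symm⟩
    · rw [if_neg hv0] at hinv
      rw [if_neg hv0, if_neg hv0]
      have hveq0 : PySem.List.pyGetD vals 0 0 = 0 := not_ne_iff.mp hv0
      rw [hveq0, sub_zero] at hinv
      have hposeq : (PySem.List.pyRange 0 (vals.length : Int) 1).filter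
          (fun i => PySem.List.pyGetD vals i 0 ≠ 0) =
          (PySem.List.pyRange 1 (vals.length : Int) 1).filter
            (fun i => PySem.List.pyGetD vals i 0 ≠ 0) := by
        rw [hsplit, List.filter_cons, if_neg (by simpa using hv0)]
      rw [hposeq] at hring0 ⊢
      congr 1
      refine pvLoop_eq name.toList.length vals _ _ _ _ 0 _ _ _ 0 hinv hsortrem hring0 ?_
      intro hne
      obtain ⟨hnx, hpv⟩ := pvNxt_init (vals.length : Int) _ hsortrem hbrem hne
      constructor
      · rw [PySem.List.pyGetD_zero, hnx]
      · rw [PySem.List.pyGetD_neg_one _ 0 hne, hpv, List.getLast_eq_getElem hne,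
          List.getD_eq_getElem _ 0 (by have := List.length_pos_iff.mpr hne; omega)]
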